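-- pv_equiv track=rewrite | github.com/navkant/ds_algo_practice | datastructures/array_practice/max_gap.py | max_gap
-- ===== SOURCE A (Python) =====
-- def max_gap(A):
--     n = len(A)
--
--     hash_map = {}
--     for i, v in enumerate(A):
--         if v not in hash_map:
--             hash_map[v] = [i]
--         else:
--             hash_map[v].append(i)
--     A.sort(reverse=False)
--     diff = 0
--     temp = len(A)
--     for i in range(len(A)):
--         if temp > hash_map[A[i]][0]:
--             temp = hash_map[A[i]][0]
--         diff = max(diff, hash_map[A[i]][-1] - temp)
--     return diff
-- ===== SOURCE B (Python) =====
-- def max_gap(A):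
--     n = len(A)
--     if n == 0:
--         return 0
--     pref = []                # pref[i] = min(A[0..i])
--     m = A[0]
--     for x in A:
--         m = min(m, x)
--         pref.append(m)
--     suf = []                 # suf[j] = max(A[j..])
--     m = A[n - 1]
--     for x in reversed(A):
--         m = max(m, x)
--         suf.append(m)
--     suf.reverse()
--     ans = 0
--     i = 0
--     j = 0
--     while j < n:             # two-pointer sweep
--         if pref[i] <= suf[j]:
--             ans = max(ans, j - i)
--             j += 1
--         else:
--             i += 1
--     return ans
-- ===== Notes on version B (the rewrite author's own statement) =====
-- stated objective: alternative
-- what changed: Replaces the index-list hash map plus in-place sort plus running-minimum scan over the sorted values by prefix-minimum and suffix-maximum arrays with a two-pointer sweep (sort-free and hash-free); B also does not mutate its argument (A sorts it in place). Intended as the O(n) algorithm: a timing run measured ~4.5x on random inputs but only ~1.35x on already-sorted inputs (where Timsort is near-linear), so no unqualified speed is claimed.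
import Mathlib
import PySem

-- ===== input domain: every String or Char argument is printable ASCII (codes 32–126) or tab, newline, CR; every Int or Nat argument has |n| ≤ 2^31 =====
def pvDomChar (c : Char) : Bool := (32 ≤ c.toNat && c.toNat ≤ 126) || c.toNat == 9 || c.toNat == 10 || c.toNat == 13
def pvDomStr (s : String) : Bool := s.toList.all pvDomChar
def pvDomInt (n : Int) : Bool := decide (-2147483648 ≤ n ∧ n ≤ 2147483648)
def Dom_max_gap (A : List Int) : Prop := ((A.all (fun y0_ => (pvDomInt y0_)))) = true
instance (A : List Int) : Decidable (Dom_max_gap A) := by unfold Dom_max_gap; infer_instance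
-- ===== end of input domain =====

-- B replaces A's hash-map-of-index-lists + in-place sort + running-minimum scan by a sort-free
-- algorithm: prefix-minimum/suffix-maximum arrays with a two-pointer sweep (intended as faster: the
-- timing run measured ~4.5x on random inputs but only ~1.35x on already-sorted inputs, where
-- Timsort is near-linear, so no unqualified speed is claimed). A sorts its argument in
-- place; B does not mutate it — the equivalence proved here is about the return value only.

-- ===== PORT A =====
def max_gap (A : List Int) : Int :=
  let n : Int := (A.length : Int)
  let hash_map : PySem.Dict Int (List Int) :=
    (PySem.List.enumerate A).foldl
      (fun hm p =>
        if hm.contains p.2 = false then hm.insert p.2 [p.1]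
        else hm.modify p.2 [] (fun l => l ++ [p.1]))   -- hash_map[v].append(i): value list extended, dict slot unchanged
      ∅
  let As := PySem.List.sorted A (fun x => x) false      -- A.sort(reverse=False)
  let r :=
    (PySem.List.pyRange 0 n 1).foldl
      (fun (s : Int × Int) i =>                         -- s = (temp, diff)
        let v := PySem.List.pyGetD As i 0               -- A[i] after the in-place sort; i from range(len(A)) is in range
        let l := hash_map.getD v []                     -- hash_map[A[i]]: the key is always present
        let f := PySem.List.pyGetD l 0 0                -- hash_map[A[i]][0]
        let temp := if s.1 > f then f else s.1
        (temp, max s.2 (PySem.List.pyGetD l (-1) 0 - temp)))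
      (n, 0)
  r.2

-- ===== PORT B =====
-- while-loop helper for B: fuel only makes the loop total (each iteration increments i or j,
-- and the sweep below always finishes within 2*n+1 steps, as the proofs establish)
def pvTp (pref suf : List Int) (n : Nat) (fuel : Nat) (i j : Nat) (ans : Int) : Int :=
  match fuel with
  | 0 => ans
  | fuel + 1 =>
    if j < n then
      if pref.getD i 0 ≤ suf.getD j 0 then
        pvTp pref suf n fuel i (j + 1) (max ans ((j : Int) - (i : Int)))
      else
        pvTp pref suf n fuel (i + 1) j ans
    else ans

def max_gap_alt (A : List Int) : Int :=
  let n := A.length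
  if n = 0 then 0
  else
    let pref := (A.foldl (fun (s : Int × List Int) x =>
        let m := min s.1 x
        (m, s.2 ++ [m])) (A.getD 0 0, [])).2
    let suf := ((A.reverse.foldl (fun (s : Int × List Int) x =>
        let m := max s.1 x
        (m, s.2 ++ [m])) (A.getD (n - 1) 0, [])).2).reverse
    pvTp pref suf n (2 * n + 1) 0 0 0

-- ===== PRECONDITION & SPEC =====
def Spec_max_gap (A : List Int) (out : Int) : Prop := out = max_gap_alt A
instance (A : List Int) (out : Int) : Decidable (Spec_max_gap A out) := by unfold Spec_max_gap; infer_instance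

-- ===== CLAIM (what is proved, stated in full; the proofs are below) =====
def Claim_equal_max_gap : Prop := ∀ (A : List Int), Dom_max_gap A → Spec_max_gap A (max_gap A)

-- ===== LEMMAS AND PROOFS =====

def pvIdxs (A : List Int) (v : Int) : List Int :=
  (((PySem.List.enumerate A).map Prod.swap).filter (fun q => q.1 == v)).map (fun q => q.2)

lemma pvDict_getD (A : List Int) (v : Int) :
    ((PySem.List.enumerate A).foldl
      (fun hm p =>
        if hm.contains p.2 = false then hm.insert p.2 [p.1]
        else hm.modify p.2 [] (fun l => l ++ [p.1]))
      (∅ : PySem.Dict Int (List Int))).getD v [] = pvIdxs A v := by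
  rw [PySem.List.foldl_congr_mem _ _ (fun hm (p : Int × Int) => hm.modify p.2 [] (fun l => l ++ [p.1])) _ ?_]
  · have h2 : (PySem.List.enumerate A).foldl (fun (hm : PySem.Dict Int (List Int)) p => hm.modify p.2 [] (fun l => l ++ [p.1])) ∅
        = ((PySem.List.enumerate A).map Prod.swap).foldl (fun hm q => hm.modify q.1 [] (fun l => l ++ [q.2])) ∅ := by
      rw [List.foldl_map]
      rfl
    rw [h2, PySem.Dict.getD_foldl_modify_append]
    simp [pvIdxs, PySem.Dict.getD, PySem.Dict.get?]
    rfl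
  · intro hm p _
    by_cases h : hm.contains p.2
    · simp [h]
    · simp [h, PySem.Dict.modify]
      congr 1
      have : hm.getD p.2 [] = [] := by
        simp [PySem.Dict.getD]
        rw [(PySem.Dict.get?_eq_none_iff_contains hm p.2).mpr (by simpa using h)]
        rfl
      simp [this]

lemma mem_pvIdxs (A : List Int) (v k : Int) :
    k ∈ pvIdxs A v ↔ ∃ (m : Nat) (h : m < A.length), k = (m : Int) ∧ A[m] = v := by
  constructor
  · intro h
    obtain ⟨q, hq, rfl⟩ := List.mem_map.mp h
    obtain ⟨hqmem, hqv⟩ := List.mem_filter.mp hq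
    obtain ⟨p, hp, rfl⟩ := List.mem_map.mp hqmem
    obtain ⟨m, hm, rfl⟩ := (PySem.List.mem_enumerate_iff _ _ _).mp hp
    refine ⟨m, hm, by simp, ?_⟩
    simpa using (beq_iff_eq.mp hqv)
  · rintro ⟨m, hm, rfl, hv⟩
    refine List.mem_map.mpr ⟨(v, (m : Int)), List.mem_filter.mpr ⟨?_, by simp⟩, rfl⟩
    refine List.mem_map.mpr ⟨((m : Int), v), ?_, rfl⟩
    exact (PySem.List.mem_enumerate_iff _ _ _).mpr ⟨m, hm, by simp [hv]⟩

lemma pairwise_pvIdxs (A : List Int) (v : Int) : (pvIdxs A v).Pairwise (· < ·) := by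
  have h1 : ((PySem.List.enumerate A).map Prod.swap).Pairwise (fun p q : Int × Int => p.2 < q.2) := by
    rw [List.pairwise_map]
    exact PySem.List.pairwise_lt_enumerate A 0
  have h2 : (((PySem.List.enumerate A).map Prod.swap).filter (fun q => q.1 == v)).Pairwise
      (fun p q : Int × Int => p.2 < q.2) := List.Pairwise.sublist List.filter_sublist h1
  simp only [pvIdxs]
  exact (List.pairwise_map).mpr h2

lemma pvIdxs_ne_nil (A : List Int) (v : Int) (h : v ∈ A) : pvIdxs A v ≠ [] := by
  obtain ⟨m, hm, rfl⟩ := List.mem_iff_getElem.mp h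
  intro hnil
  have : (m : Int) ∈ pvIdxs A A[m] := (mem_pvIdxs _ _ _).mpr ⟨m, hm, rfl, rfl⟩
  simp [hnil] at this

def pvFst (A : List Int) (v : Int) : Int := PySem.List.pyGetD (pvIdxs A v) 0 0
def pvLst (A : List Int) (v : Int) : Int := PySem.List.pyGetD (pvIdxs A v) (-1) 0

lemma pv_head_le (l : List Int) (hp : l.Pairwise (· < ·)) :
    ∀ k ∈ l, PySem.List.pyGetD l 0 0 ≤ k := by
  intro k hk
  rw [PySem.List.pyGetD_zero]
  cases l with
  | nil => simp at hk
  | cons x t =>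
    rcases List.mem_cons.mp hk with rfl | ht
    · simp
    · simpa using le_of_lt ((List.pairwise_cons.mp hp).1 k ht)

lemma pv_last_ge_getLast (l : List Int) (hp : l.Pairwise (· < ·)) (hl : l ≠ []) :
    ∀ k ∈ l, k ≤ l.getLast hl := by
  induction l with
  | nil => simp at hl
  | cons x t ih =>
    intro k hk
    by_cases ht : t = []
    · subst ht; simp at hk; simp [hk]
    · rw [List.getLast_cons ht]
      rcases List.mem_cons.mp hk with rfl | hmem
      · exact le_of_lt ((List.pairwise_cons.mp hp).1 _ (List.getLast_mem ht))
      · exact ih (List.pairwise_cons.mp hp).2 ht k hmem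

lemma pv_last_ge (l : List Int) (hl : l ≠ []) (hp : l.Pairwise (· < ·)) :
    ∀ k ∈ l, k ≤ PySem.List.pyGetD l (-1) 0 := by
  intro k hk
  rw [PySem.List.pyGetD_neg_one l 0 hl]
  exact pv_last_ge_getLast l hp hl k hk

lemma pv_head_mem (l : List Int) (hl : l ≠ []) : PySem.List.pyGetD l 0 0 ∈ l := by
  rw [PySem.List.pyGetD_zero]
  cases l with
  | nil => simp at hl
  | cons x t => simp

lemma pv_last_mem (l : List Int) (hl : l ≠ []) : PySem.List.pyGetD l (-1) 0 ∈ l := by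
  rw [PySem.List.pyGetD_neg_one l 0 hl]
  exact List.getLast_mem hl

def pvStep (A : List Int) (s : Int × Int) (v : Int) : Int × Int :=
  let f := pvFst A v
  let temp := if s.1 > f then f else s.1
  (temp, max s.2 (pvLst A v - temp))

lemma pvStep_fst_le (A : List Int) (s : Int × Int) (v : Int) : (pvStep A s v).1 ≤ s.1 := by
  simp only [pvStep]
  split_ifs with h <;> omega

lemma pvStep_fst_le_fst (A : List Int) (s : Int × Int) (v : Int) : (pvStep A s v).1 ≤ pvFst A v := by
  simp only [pvStep]
  split_ifs with h <;> omega

lemma pvStep_snd_ge (A : List Int) (s : Int × Int) (v : Int) : s.2 ≤ (pvStep A s v).2 := by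
  simp only [pvStep]; exact le_max_left _ _

lemma pvStep_snd_ge_diff (A : List Int) (s : Int × Int) (v : Int) :
    pvLst A v - (pvStep A s v).1 ≤ (pvStep A s v).2 := by
  simp only [pvStep]; exact le_max_right _ _

lemma loop_mono (A : List Int) (l : List Int) (s : Int × Int) :
    (l.foldl (pvStep A) s).1 ≤ s.1 ∧ s.2 ≤ (l.foldl (pvStep A) s).2 := by
  induction l generalizing s with
  | nil => simp
  | cons v t ih =>
    simp only [List.foldl_cons]
    constructor
    · exact le_trans (ih (pvStep A s v)).1 (pvStep_fst_le A s v)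
    · exact le_trans (pvStep_snd_ge A s v) (ih (pvStep A s v)).2

lemma loop_UB (A : List Int) (l : List Int) (s : Int × Int) (C : Int)
    (h0 : s.2 ≤ C)
    (h1 : ∀ v ∈ l, pvLst A v - s.1 ≤ C)
    (h2 : ∀ u v, u ∈ l → v ∈ l → u ≤ v → pvLst A v - pvFst A u ≤ C)
    (hp : l.Pairwise (· ≤ ·)) :
    (l.foldl (pvStep A) s).2 ≤ C := by
  induction l generalizing s with
  | nil => simpa using h0
  | cons v t ih =>
    simp only [List.foldl_cons]
    have hstep1 : (pvStep A s v).2 ≤ C := by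
      simp only [pvStep]
      refine max_le h0 ?_
      split_ifs with h
      · exact h2 v v (by simp) (by simp) le_rfl
      · exact h1 v (by simp)
    refine ih (pvStep A s v) hstep1 ?_ ?_ (List.pairwise_cons.mp hp).2
    · intro w hw
      have hvw : v ≤ w := (List.pairwise_cons.mp hp).1 w hw
      have : pvLst A w - pvFst A v ≤ C := h2 v w (by simp) (by simp [hw]) hvw
      have h1' : pvLst A w - s.1 ≤ C := h1 w (by simp [hw])
      simp only [pvStep]
      split_ifs with h <;> omega
    · intro u w hu hw huw
      exact h2 u w (by simp [hu]) (by simp [hw]) huw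

lemma loop_LBa (A : List Int) (l : List Int) (s : Int × Int) (v : Int) (hv : v ∈ l) :
    pvLst A v - s.1 ≤ (l.foldl (pvStep A) s).2 := by
  induction l generalizing s with
  | nil => simp at hv
  | cons w t ih =>
    simp only [List.foldl_cons]
    rcases List.mem_cons.mp hv with rfl | hmem
    · have h1 : pvLst A v - s.1 ≤ (pvStep A s v).2 := by
        have := pvStep_snd_ge_diff A s v
        have := pvStep_fst_le A s v
        omega
      exact le_trans h1 (loop_mono A t (pvStep A s v)).2
    · have h1 := ih (pvStep A s w) hmem
      have := pvStep_fst_le A s w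
      omega

lemma loop_LBc (A : List Int) (l : List Int) (s : Int × Int) (v : Int) (hv : v ∈ l) :
    pvLst A v - pvFst A v ≤ (l.foldl (pvStep A) s).2 := by
  obtain ⟨X, Y, rfl⟩ := List.append_of_mem hv
  rw [List.foldl_append]
  simp only [List.foldl_cons]
  have h1 : pvLst A v - pvFst A v ≤ (pvStep A (X.foldl (pvStep A) s) v).2 := by
    have := pvStep_snd_ge_diff A (X.foldl (pvStep A) s) v
    have := pvStep_fst_le_fst A (X.foldl (pvStep A) s) v
    omega
  exact le_trans h1 (loop_mono A Y _).2

lemma loop_LBb (A : List Int) (l : List Int) (s : Int × Int) (u v : Int)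
    (hu : u ∈ l) (hv : v ∈ l) (huv : u < v) (hp : l.Pairwise (· ≤ ·)) :
    pvLst A v - pvFst A u ≤ (l.foldl (pvStep A) s).2 := by
  obtain ⟨X, Y, rfl⟩ := List.append_of_mem hu
  have hvY : v ∈ Y := by
    rcases List.mem_append.mp hv with hX | hUY
    · exfalso
      have := (List.pairwise_append.mp hp).2.2 v hX u (by simp)
      omega
    · rcases List.mem_cons.mp hUY with rfl | h
      · omega
      · exact h
  rw [List.foldl_append]
  simp only [List.foldl_cons]
  have htemp : (pvStep A (X.foldl (pvStep A) s) u).1 ≤ pvFst A u := pvStep_fst_le_fst A _ u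
  have := loop_LBa A Y (pvStep A (X.foldl (pvStep A) s) u) v hvY
  omega

def pscan (op : Int → Int → Int) (c : Int) : List Int → List Int
  | [] => []
  | x :: t => op c x :: pscan op (op c x) t

lemma pscan_length (op : Int → Int → Int) (c : Int) (L : List Int) :
    (pscan op c L).length = L.length := by
  induction L generalizing c with
  | nil => rfl
  | cons x t ih => simp [pscan, ih]

lemma pfold_min (L : List Int) (c : Int) (acc : List Int) :
    (L.foldl (fun (s : Int × List Int) x => (min s.1 x, s.2 ++ [min s.1 x])) (c, acc)).2
      = acc ++ pscan min c L := by
  induction L generalizing c acc with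
  | nil => simp [pscan]
  | cons x t ih => simp [pscan, ih]

lemma pfold_max (L : List Int) (c : Int) (acc : List Int) :
    (L.foldl (fun (s : Int × List Int) x => (max s.1 x, s.2 ++ [max s.1 x])) (c, acc)).2
      = acc ++ pscan max c L := by
  induction L generalizing c acc with
  | nil => simp [pscan]
  | cons x t ih => simp [pscan, ih]

lemma psmin_le_self (c : Int) (L : List Int) :
    ∀ k, k < L.length → (pscan min c L).getD k 0 ≤ L.getD k 0 := by
  induction L generalizing c with
  | nil => simp
  | cons x t ih =>
    intro k hk
    cases k with
    | zero => simp [pscan]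
    | succ k =>
      simp only [pscan, List.getD_cons_succ]
      exact ih (min c x) k (by simpa using hk)

lemma psmin_rep (c : Int) (L : List Int) :
    ∀ k, k < L.length →
      (pscan min c L).getD k 0 = c ∨ ∃ i0, i0 ≤ k ∧ (pscan min c L).getD k 0 = L.getD i0 0 := by
  induction L generalizing c with
  | nil => simp
  | cons x t ih =>
    intro k hk
    cases k with
    | zero =>
      rcases min_choice c x with h | h
      · exact Or.inl (by simp [pscan, h])
      · exact Or.inr ⟨0, le_refl _, by simp [pscan, h]⟩
    | succ k =>
      simp only [pscan, List.getD_cons_succ]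
      rcases ih (min c x) k (by simpa using hk) with h | ⟨i0, hi0, he⟩
      · rcases min_choice c x with h' | h'
        · exact Or.inl (by rw [h, h'])
        · exact Or.inr ⟨0, by omega, by rw [h, h']; simp⟩
      · exact Or.inr ⟨i0 + 1, by omega, by simpa using he⟩

lemma psmax_ge_c (c : Int) (L : List Int) :
    ∀ k, k < L.length → c ≤ (pscan max c L).getD k 0 := by
  induction L generalizing c with
  | nil => simp
  | cons x t ih =>
    intro k hk
    cases k with
    | zero => simp [pscan]
    | succ k =>
      simp only [pscan, List.getD_cons_succ]
      exact le_trans (le_max_left c x) (ih (max c x) k (by simpa using hk))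

lemma psmax_ge_self (c : Int) (L : List Int) :
    ∀ k, k < L.length → L.getD k 0 ≤ (pscan max c L).getD k 0 := by
  induction L generalizing c with
  | nil => simp
  | cons x t ih =>
    intro k hk
    cases k with
    | zero => simp [pscan]
    | succ k =>
      simp only [pscan, List.getD_cons_succ]
      exact ih (max c x) k (by simpa using hk)

lemma psmax_monotone (c : Int) (L : List Int) :
    ∀ k k', k ≤ k' → k' < L.length → (pscan max c L).getD k 0 ≤ (pscan max c L).getD k' 0 := by
  induction L generalizing c with
  | nil => simp
  | cons x t ih =>
    intro k k' hkk hk'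
    cases k with
    | zero =>
      cases k' with
      | zero => simp
      | succ k' =>
        simp only [pscan, List.getD_cons_succ, List.getD_cons_zero]
        exact psmax_ge_c (max c x) t k' (by simpa using hk')
    | succ k =>
      cases k' with
      | zero => omega
      | succ k' =>
        simp only [pscan, List.getD_cons_succ]
        exact ih (max c x) k k' (by omega) (by simpa using hk')

lemma psmax_rep (c : Int) (L : List Int) :
    ∀ k, k < L.length →
      (pscan max c L).getD k 0 = c ∨ ∃ i0, i0 ≤ k ∧ (pscan max c L).getD k 0 = L.getD i0 0 := by
  induction L generalizing c with
  | nil => simp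
  | cons x t ih =>
    intro k hk
    cases k with
    | zero =>
      rcases max_choice c x with h | h
      · exact Or.inl (by simp [pscan, h])
      · exact Or.inr ⟨0, le_refl _, by simp [pscan, h]⟩
    | succ k =>
      simp only [pscan, List.getD_cons_succ]
      rcases ih (max c x) k (by simpa using hk) with h | ⟨i0, hi0, he⟩
      · rcases max_choice c x with h' | h'
        · exact Or.inl (by rw [h, h'])
        · exact Or.inr ⟨0, by omega, by rw [h, h']; simp⟩
      · exact Or.inr ⟨i0 + 1, by omega, by simpa using he⟩

lemma tp_ge_ans (pref suf : List Int) (n : Nat) :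
    ∀ fuel i j ans, ans ≤ pvTp pref suf n fuel i j ans := by
  intro fuel
  induction fuel with
  | zero => intro i j ans; simp [pvTp]
  | succ fuel ih =>
    intro i j ans
    simp only [pvTp]
    split_ifs with h1 h2
    · exact le_trans (le_max_left _ _) (ih i (j + 1) _)
    · exact ih (i + 1) j ans
    · exact le_refl _

lemma tp_ub (pref suf : List Int) (n : Nat) (C : Int)
    (hps : ∀ k, k < n → pref.getD k 0 ≤ suf.getD k 0)
    (hpair : ∀ i j : Nat, i ≤ j → j < n → pref.getD i 0 ≤ suf.getD j 0 → (j : Int) - (i : Int) ≤ C) :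
    ∀ fuel i j ans, i ≤ j → j ≤ n → ans ≤ C → pvTp pref suf n fuel i j ans ≤ C := by
  intro fuel
  induction fuel with
  | zero => intro i j ans _ _ h; simpa [pvTp] using h
  | succ fuel ih =>
    intro i j ans hij hjn hans
    simp only [pvTp]
    split_ifs with h1 h2
    · exact ih i (j + 1) _ (by omega) (by omega) (max_le hans (hpair i j hij h1 h2))
    · have hne : i ≠ j := by rintro rfl; exact h2 (hps i h1)
      exact ih (i + 1) j ans (by omega) hjn hans
    · exact hans

lemma tp_lb (pref suf : List Int) (n : Nat)
    (hps : ∀ k, k < n → pref.getD k 0 ≤ suf.getD k 0)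
    (hsa : ∀ k k', k ≤ k' → k' < n → suf.getD k' 0 ≤ suf.getD k 0)
    (a b : Nat) (hab : a ≤ b) (hbn : b < n) (hv : pref.getD a 0 ≤ suf.getD b 0) :
    ∀ fuel i j ans, (n - i) + (n - j) < fuel → i ≤ j → j ≤ n →
      (∀ i' j' : Nat, i' ≤ j' → j' < j → pref.getD i' 0 ≤ suf.getD j' 0 → (j' : Int) - (i' : Int) ≤ ans) →
      (∀ i', i' < i → j < n → suf.getD j 0 < pref.getD i' 0) →
      (b : Int) - (a : Int) ≤ pvTp pref suf n fuel i j ans := by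
  intro fuel
  induction fuel with
  | zero => intro i j ans hf _ _ _ _; omega
  | succ fuel ih =>
    intro i j ans hf hij hjn hinv hhi
    simp only [pvTp]
    split_ifs with h1 h2
    · -- pref[i] ≤ suf[j]: advance j
      refine ih i (j + 1) _ (by omega) (by omega) (by omega) ?_ ?_
      · intro i' j' hij' hj' hv'
        rcases Nat.lt_or_ge j' j with hlt | hge
        · exact le_trans (hinv i' j' hij' hlt hv') (le_max_left _ _)
        · have hj'j : j' = j := by omega
          subst hj'j
          rcases Nat.lt_or_ge i' i with hi' | hi'
          · exact absurd hv' (not_le.mpr (hhi i' hi' h1))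
          · have : (j' : Int) - (i' : Int) ≤ (j' : Int) - (i : Int) := by omega
            exact le_trans this (le_max_right _ _)
      · intro i' hi' hj1
        exact lt_of_le_of_lt (hsa j (j + 1) (by omega) hj1) (hhi i' hi' h1)
    · -- pref[i] > suf[j]: advance i
      have hne : i ≠ j := by rintro rfl; exact h2 (hps i h1)
      refine ih (i + 1) j ans (by omega) (by omega) hjn hinv ?_
      intro i' hi' hj
      rcases Nat.lt_or_ge i' i with h | h
      · exact hhi i' h hj
      · have : i' = i := by omega
        subst this
        exact not_le.mp h2
    · -- j = n: the loop is over
      have hjn' : j = n := by omega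
      exact hinv a b hab (by omega) hv

lemma alt_eq (A : List Int) (h : A.length ≠ 0) :
    max_gap_alt A = pvTp (pscan min (A.getD 0 0) A)
      ((pscan max (A.getD (A.length - 1) 0) A.reverse).reverse)
      A.length (2 * A.length + 1) 0 0 0 := by
  simp only [max_gap_alt, if_neg h, pfold_min, pfold_max, List.nil_append]

lemma S_getD (A : List Int) (c : Int) (k : Nat) (hk : k < A.length) :
    ((pscan max c A.reverse).reverse).getD k 0 = (pscan max c A.reverse).getD (A.length - 1 - k) 0 := by
  have h1 : (pscan max c A.reverse).length = A.length := by rw [pscan_length, List.length_reverse]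
  have hk2 : k < ((pscan max c A.reverse).reverse).length := by simp only [List.length_reverse, h1]; exact hk
  have hk3 : A.length - 1 - k < (pscan max c A.reverse).length := by omega
  rw [List.getD_eq_getElem _ _ hk2, List.getD_eq_getElem _ _ hk3, List.getElem_reverse]
  congr 1
  omega

lemma R_getD (A : List Int) (t : Nat) (ht : t < A.length) :
    A.reverse.getD t 0 = A.getD (A.length - 1 - t) 0 := by
  have ht2 : t < A.reverse.length := by simpa using ht
  have ht3 : A.length - 1 - t < A.length := by omega
  rw [List.getD_eq_getElem _ _ ht2, List.getD_eq_getElem _ _ ht3, List.getElem_reverse]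

lemma S_ge_self (A : List Int) (c : Int) (k : Nat) (hk : k < A.length) :
    A.getD k 0 ≤ ((pscan max c A.reverse).reverse).getD k 0 := by
  rw [S_getD A c k hk]
  have ht : A.length - 1 - k < A.reverse.length := by simp; omega
  have := psmax_ge_self c A.reverse (A.length - 1 - k) ht
  rw [R_getD A (A.length - 1 - k) (by omega)] at this
  have he : A.length - 1 - (A.length - 1 - k) = k := by omega
  rwa [he] at this

lemma S_antitone (A : List Int) (c : Int) (k k' : Nat) (hkk : k ≤ k') (hk' : k' < A.length) :
    ((pscan max c A.reverse).reverse).getD k' 0 ≤ ((pscan max c A.reverse).reverse).getD k 0 := by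
  rw [S_getD A c k (by omega), S_getD A c k' hk']
  exact psmax_monotone c A.reverse (A.length - 1 - k') (A.length - 1 - k) (by omega) (by simp; omega)

lemma S_rep (A : List Int) (c : Int) (k : Nat) (hk : k < A.length) (hc : c = A.getD (A.length - 1) 0) :
    ∃ j0, k ≤ j0 ∧ j0 < A.length ∧ ((pscan max c A.reverse).reverse).getD k 0 = A.getD j0 0 := by
  rw [S_getD A c k hk]
  rcases psmax_rep c A.reverse (A.length - 1 - k) (by simp; omega) with h | ⟨t0, ht0, he⟩
  · exact ⟨A.length - 1, by omega, by omega, by rw [h, hc]⟩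
  · refine ⟨A.length - 1 - t0, by omega, by omega, ?_⟩
    rw [he, R_getD A t0 (by omega)]

lemma P_rep (A : List Int) (k : Nat) (hk : k < A.length) :
    ∃ i0, i0 ≤ k ∧ i0 < A.length ∧ (pscan min (A.getD 0 0) A).getD k 0 = A.getD i0 0 := by
  rcases psmin_rep (A.getD 0 0) A k hk with h | ⟨i0, hi0, he⟩
  · exact ⟨0, by omega, by omega, h⟩
  · exact ⟨i0, hi0, by omega, he⟩

lemma hps_fact (A : List Int) (k : Nat) (hk : k < A.length) :
    (pscan min (A.getD 0 0) A).getD k 0 ≤ ((pscan max (A.getD (A.length - 1) 0) A.reverse).reverse).getD k 0 :=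
  le_trans (psmin_le_self (A.getD 0 0) A k hk) (S_ge_self A _ k hk)

lemma B_nonneg (A : List Int) : 0 ≤ max_gap_alt A := by
  by_cases h : A.length = 0
  · simp [max_gap_alt, h]
  · rw [alt_eq A h]
    exact tp_ge_ans _ _ _ _ 0 0 0

lemma B_lb (A : List Int) (i j : Int) (h0 : 0 ≤ i) (hij : i < j) (hj : j < (A.length : Int))
    (hle : PySem.List.pyGetD A i 0 ≤ PySem.List.pyGetD A j 0) : j - i ≤ max_gap_alt A := by
  obtain ⟨a, rfl⟩ : ∃ m : Nat, i = (m : Int) := ⟨i.toNat, (Int.toNat_of_nonneg h0).symm⟩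
  obtain ⟨b, rfl⟩ : ∃ m : Nat, j = (m : Int) := ⟨j.toNat, (Int.toNat_of_nonneg (by omega)).symm⟩
  rw [PySem.List.pyGetD_natCast, PySem.List.pyGetD_natCast] at hle
  have hbn : b < A.length := by omega
  have hn : A.length ≠ 0 := by omega
  rw [alt_eq A hn]
  refine tp_lb _ _ _ (fun k hk => hps_fact A k hk) (fun k k' h1 h2 => S_antitone A _ k k' h1 h2)
    a b (by omega) hbn ?_ (2 * A.length + 1) 0 0 0 (by omega) (by omega) (by omega)
    (by intro i' j' _ h _; omega) (by intro i' h _; omega)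
  exact le_trans (psmin_le_self (A.getD 0 0) A a (by omega))
    (le_trans hle (S_ge_self A _ b hbn))

lemma B_ub (A : List Int) (C : Int) (hC : 0 ≤ C)
    (h : ∀ i j : Int, 0 ≤ i → i < j → j < (A.length : Int) →
      PySem.List.pyGetD A i 0 ≤ PySem.List.pyGetD A j 0 → j - i ≤ C) :
    max_gap_alt A ≤ C := by
  by_cases hn : A.length = 0
  · simpa [max_gap_alt, hn] using hC
  · rw [alt_eq A hn]
    refine tp_ub _ _ _ C (fun k hk => hps_fact A k hk) ?_ _ 0 0 0 (by omega) (by omega) hC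
    intro a b hab hbn hv
    obtain ⟨i0, hi0a, hi0n, he1⟩ := P_rep A a (by omega)
    obtain ⟨j0, hj0b, hj0n, he2⟩ := S_rep A _ b hbn rfl
    rw [he1, he2] at hv
    rcases Nat.lt_or_ge i0 j0 with hlt | hge
    · have := h (i0 : Int) (j0 : Int) (by omega) (by omega) (by omega)
        (by rw [PySem.List.pyGetD_natCast, PySem.List.pyGetD_natCast]; exact hv)
      omega
    · omega

lemma A_eq_loop (A : List Int) :
    max_gap A = ((PySem.List.sorted A (fun x => x) false).foldl (pvStep A) ((A.length : Int), 0)).2 := by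
  have e1 : ∀ v : Int, PySem.List.pyGetD (pvIdxs A v) 0 0 = pvFst A v := fun _ => rfl
  have e2 : ∀ v : Int, PySem.List.pyGetD (pvIdxs A v) (-1) 0 = pvLst A v := fun _ => rfl
  have hlen : ((A.length : Int)) = ((PySem.List.sorted A (fun x => x) false).length : Int) := by
    rw [PySem.List.length_sorted]
  simp only [max_gap, pvDict_getD, e1, e2]
  rw [hlen, ← PySem.List.foldl_pyRange_zero_pyGetD' (PySem.List.sorted A (fun x => x) false) 0
    (pvStep A) (((PySem.List.sorted A (fun x => x) false).length : Int), 0)]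
  rfl

lemma pvFst_le_mem (A : List Int) (v : Int) : ∀ k ∈ pvIdxs A v, pvFst A v ≤ k :=
  pv_head_le (pvIdxs A v) (pairwise_pvIdxs A v)

lemma pvLst_ge_mem (A : List Int) (v : Int) (h : v ∈ A) : ∀ k ∈ pvIdxs A v, k ≤ pvLst A v :=
  pv_last_ge (pvIdxs A v) (pvIdxs_ne_nil A v h) (pairwise_pvIdxs A v)

lemma pvFst_idx (A : List Int) (v : Int) (h : v ∈ A) :
    ∃ (m : Nat) (hm : m < A.length), pvFst A v = (m : Int) ∧ A[m] = v :=
  (mem_pvIdxs A v _).mp (pv_head_mem (pvIdxs A v) (pvIdxs_ne_nil A v h))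

lemma pvLst_idx (A : List Int) (v : Int) (h : v ∈ A) :
    ∃ (m : Nat) (hm : m < A.length), pvLst A v = (m : Int) ∧ A[m] = v :=
  (mem_pvIdxs A v _).mp (pv_last_mem (pvIdxs A v) (pvIdxs_ne_nil A v h))

lemma pyGetD_at_nat (A : List Int) (m : Nat) (hm : m < A.length) :
    PySem.List.pyGetD A ((m : Int)) 0 = A[m] := by
  rw [PySem.List.pyGetD_natCast]
  exact List.getD_eq_getElem A 0 hm

lemma pv_key (A : List Int) : max_gap A = max_gap_alt A := by
  rw [A_eq_loop]
  have hmemS : ∀ x : Int, x ∈ PySem.List.sorted A (fun x => x) false ↔ x ∈ A :=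
    fun x => PySem.List.mem_sorted A (fun x => x) false x
  have hpair : (PySem.List.sorted A (fun x => x) false).Pairwise (· ≤ ·) := by
    simpa using PySem.List.sorted_pairwise A (fun x => x)
  apply le_antisymm
  · refine loop_UB A _ _ _ (by simpa using B_nonneg A) ?_ ?_ hpair
    · intro v hv
      obtain ⟨m, hm, he, _⟩ := pvLst_idx A v ((hmemS v).mp hv)
      have := B_nonneg A
      simp only []
      omega
    · intro u v hu hv huv
      obtain ⟨m1, hm1, he1, hg1⟩ := pvFst_idx A u ((hmemS u).mp hu)
      obtain ⟨m2, hm2, he2, hg2⟩ := pvLst_idx A v ((hmemS v).mp hv)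
      by_cases hlt : pvFst A u < pvLst A v
      · have hgd : PySem.List.pyGetD A (pvFst A u) 0 ≤ PySem.List.pyGetD A (pvLst A v) 0 := by
          rw [he1, he2, pyGetD_at_nat A m1 hm1, pyGetD_at_nat A m2 hm2, hg1, hg2]; exact huv
        exact B_lb A (pvFst A u) (pvLst A v) (by omega) hlt (by omega) hgd
      · have := B_nonneg A
        omega
  · refine B_ub A _ (by simpa using (loop_mono A _ ((A.length : Int), 0)).2) ?_
    intro i j h0 hij hj hle
    have h0j : (0:Int) ≤ j := by omega
    obtain ⟨mi, rfl⟩ : ∃ m : Nat, i = (m : Int) := ⟨i.toNat, (Int.toNat_of_nonneg h0).symm⟩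
    obtain ⟨mj, rfl⟩ : ∃ m : Nat, j = (m : Int) := ⟨j.toNat, (Int.toNat_of_nonneg h0j).symm⟩
    have hmi : mi < A.length := by omega
    have hmj : mj < A.length := by omega
    rw [pyGetD_at_nat A mi hmi, pyGetD_at_nat A mj hmj] at hle
    have humem : A[mi] ∈ A := List.getElem_mem hmi
    have hvmem : A[mj] ∈ A := List.getElem_mem hmj
    have hFu : pvFst A A[mi] ≤ (mi : Int) :=
      pvFst_le_mem A _ _ ((mem_pvIdxs A _ _).mpr ⟨mi, hmi, rfl, rfl⟩)
    have hLv : (mj : Int) ≤ pvLst A A[mj] :=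
      pvLst_ge_mem A _ hvmem _ ((mem_pvIdxs A _ _).mpr ⟨mj, hmj, rfl, rfl⟩)
    rcases eq_or_lt_of_le hle with heq | hltv
    · rw [← heq] at hLv
      have := loop_LBc A _ ((A.length : Int), 0) A[mi] ((hmemS _).mpr humem)
      omega
    · have := loop_LBb A _ ((A.length : Int), 0) A[mi] A[mj]
        ((hmemS _).mpr humem) ((hmemS _).mpr hvmem) hltv hpair
      omega

-- ===== VERDICT (by name: the statement is the Claim_ definition above) =====
theorem max_gap_spec : Claim_equal_max_gap := by
  intro A _
  exact pv_key A
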